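-- pv_equiv track=rewrite | github.com/vanelozano7312/cryptoverse | BackendReady/backendready.py | permufiesta
-- ===== SOURCE A (Python) =====
-- def convert (list):
--   """
--   Converst a list of characters into a list of numbers
--   corresponding to it's position on the alphabet
--   """
--   lista = ['a', 'b', 'c', 'd', 'e', 'f', 'g', 'h', 'i', 'j', 'k', 'l','m', 'n', 'o', 'p', 'q', 'r', 's', 't', 'u', 'v', 'w', 'x', 'y', 'z']
--   count = 0
--   for i in list:
--     for j in range(len(lista)):
--       if i == lista[j]:
--         list[count]= j
--         continue
--     count = count + 1
--   return list
--
-- def deconvert(list):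
--   """
--   Converts a list of numbers to a list of characters corresponding
--   to it's position on the alphabet
--   """
--   lista = ['a', 'b', 'c', 'd', 'e', 'f', 'g', 'h', 'i', 'j', 'k', 'l','m', 'n', 'o', 'p', 'q', 'r', 's', 't', 'u', 'v', 'w', 'x', 'y', 'z']
--   string = ""
--   for i in range(len(list)):
--     list[i] = lista[int(list[i])]
--     string = string + list[i]
--   return string
--
-- def permufiesta(palabra,m,l):
--   chunks = [palabra[x:x+m] for x in range(0, len(palabra), m)]
--   final=[]
--   for x in chunks:
--     test = []
--     for i in range(l,len(x)):
--       test.append(x[i])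
--     for i in range(l):
--       test.append(x[i])
--       if(i>=len(x)-1):
--         break
--     final.extend(test)
--   final = convert(final)
--   final = deconvert(final)
--   return final
-- ===== SOURCE B (Python) =====
-- def permufiesta(palabra, m, l):
--     chunks = (palabra[x:x + m] for x in range(0, len(palabra), m))
--     return ''.join(c[l:] + c[:l] for c in chunks)
-- ===== Notes on version B (the rewrite author's own statement) =====
-- stated objective: simpler
-- what changed: One pass that rotates each m-chunk by slicing (c[l:]+c[:l]) and joins them directly, eliminating A's element-by-element append loops with a break and the convert/deconvert helpers that scan a 26-letter alphabet per character (the constant-factor speedup); Pre_ excludes m=0 (range step 0 raises ValueError), and for m>0: characters outside [a-z0-9] (int(c) in deconvert raises ValueError) and negative l (A raises IndexError or returns a duplicated-character artefact of negative-index wraparound).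
-- intended difference: On inputs with m>0 whose word contains a digit, A returns the digit replaced by the alphabet letter at that index (an accident of its deconvert helper, e.g. '1' -> 'b'), while B keeps the digit unchanged in the rotated output, which is what a chunk-rotation function is meant to do. — e.g. on permufiesta("1", 1, 0): A returns "b", B returns "1"
-- outside the precondition, e.g. on permufiesta('abc', 2, -1): A returns 'babcc', B returns 'bac'
import Mathlib
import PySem

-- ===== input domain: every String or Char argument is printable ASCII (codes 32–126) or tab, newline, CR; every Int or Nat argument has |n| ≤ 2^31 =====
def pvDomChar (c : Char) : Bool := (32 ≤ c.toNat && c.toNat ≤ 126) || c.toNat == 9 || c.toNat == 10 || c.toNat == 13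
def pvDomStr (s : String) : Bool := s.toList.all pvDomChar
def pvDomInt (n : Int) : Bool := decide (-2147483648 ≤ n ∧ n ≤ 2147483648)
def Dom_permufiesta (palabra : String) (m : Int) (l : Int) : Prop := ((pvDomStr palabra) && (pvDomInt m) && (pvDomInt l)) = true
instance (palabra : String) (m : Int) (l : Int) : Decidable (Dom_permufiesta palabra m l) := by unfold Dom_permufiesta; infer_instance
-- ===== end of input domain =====

-- B fuses chunking and rotation into one pass: each m-chunk is rotated by slicing
-- (chunk[l:] + chunk[:l]) and joined directly, dropping A's append loops with a break and its
-- convert/deconvert alphabet-scanning helpers (objective: simpler). On words containing digits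
-- (with m > 0) the two differ by design: see D_permufiesta.


-- ===== PORT A =====
-- the heterogeneous elements of A's intermediate list (chars, replaced by ints by convert)
inductive PyElem where
  | ch (c : Char)
  | num (n : Int)
  deriving DecidableEq, Repr

def listaA : List Char :=
  ['a','b','c','d','e','f','g','h','i','j','k','l','m','n','o','p','q','r','s','t','u','v','w','x','y','z']

-- convert's inner loop: for j in range(len(lista)): if i == lista[j]: list[count] = j
def innerC (i : PyElem) (count : Int) (cur : List PyElem) : List PyElem :=
  (PySem.List.pyRange 0 (PySem.List.len listaA) 1).foldl
    (fun cur j => if i = PyElem.ch (PySem.List.pyGetD listaA j ' ') then PySem.List.pySetD cur count (PyElem.num j) else cur) cur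

-- convert: for i in list: <inner loop>; count = count + 1   (return value; mutation in place not modelled)
def convertA (lst : List PyElem) : List PyElem :=
  (lst.foldl (fun (st : List PyElem × Int) i => (innerC i st.2 st.1, st.2 + 1)) (lst, 0)).1

-- deconvert: string = string + lista[int(list[i])]; none = ValueError (int) / IndexError (lista[...])
def deconvertA (lst : List PyElem) : Option (List Char) :=
  lst.foldl (fun (acc : Option (List Char)) e =>
    acc.bind (fun s =>
      ((match e with
        | .num n => some n
        | .ch c => PySem.Int.ofChars? [c])).bind (fun v =>
        (PySem.List.pyGet? listaA v).map (fun d => s ++ [d])))) (some [])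

-- the second per-chunk loop of A: for i in range(l): test.append(x[i]); if i >= len(x)-1: break
-- fuel = len(x) suffices: the break bounds the iterations (for empty x with 0 < l Python raises; excluded by Pre_)
def loopA2 : Nat → List Char → Int → Int → List Char → List Char
  | 0, _, _, _, acc => acc
  | fuel + 1, x, l, i, acc =>
    if i < l then
      let acc2 := acc ++ [PySem.List.pyGetD x i ' ']
      if i ≥ PySem.List.len x - 1 then acc2 else loopA2 fuel x l (i + 1) acc2
    else acc

-- per-chunk body: test = []; for i in range(l, len(x)): test.append(x[i]); <second loop>
def testOf (l : Int) (x : List Char) : List Char :=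
  loopA2 x.length x l 0
    ((PySem.List.pyRange l (PySem.List.len x) 1).foldl (fun t i => t ++ [PySem.List.pyGetD x i ' ']) [])

def permufiesta (palabra : String) (m : Int) (l : Int) : String :=
  let cs := palabra.toList
  let chunks := (PySem.List.pyRange 0 (PySem.List.len cs) m).map
      (fun x => PySem.List.slice cs (some x) (some (x + m)))
  let finalL := chunks.foldl (fun final x => final ++ testOf l x) []
  match deconvertA (convertA (finalL.map PyElem.ch)) with
  | some s => String.ofList s
  | none => ""   -- Python raises here (ValueError/IndexError); excluded by Pre_

-- ===== PORT B =====
-- c[l:] + c[:l]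
def rotOf (l : Int) (chunk : List Char) : List Char :=
  PySem.List.slice chunk (some l) none ++ PySem.List.slice chunk none (some l)

def permufiesta_alt (palabra : String) (m : Int) (l : Int) : String :=
  let cs := palabra.toList
  String.ofList ((PySem.List.pyRange 0 (PySem.List.len cs) m).foldl (fun acc x0 =>
    acc ++ rotOf l (PySem.List.slice cs (some x0) (some (x0 + m)))) [])

-- ===== PRECONDITION & SPEC =====
-- Pre_ excludes: m = 0 (range step 0 raises ValueError); and, when m > 0 (so the chunks are
-- actually traversed): characters outside [a-z0-9], on which int(c) inside deconvert raises
-- ValueError, and negative l, restricting the rotation amount to the natural domain of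
-- nonnegative counts — for negative l, A either raises IndexError or returns an accidental
-- duplicated rotation produced by negative-index wraparound.
def Pre_permufiesta (palabra : String) (m : Int) (l : Int) : Prop :=
  m ≠ 0 ∧ (m < 0 ∨ (0 ≤ l ∧
    palabra.toList.all (fun c => ('a' ≤ c && c ≤ 'z') || ('0' ≤ c && c ≤ '9')) = true))
instance (palabra : String) (m : Int) (l : Int) : Decidable (Pre_permufiesta palabra m l) := by
  unfold Pre_permufiesta; infer_instance

def pvWitness_permufiesta : String × Int × Int := ("abz", 2, 1)

-- On inputs with m > 0 whose word contains a digit, A returns the digit replaced by the alphabet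
-- letter at that index (an accident of its deconvert helper, e.g. '1' -> 'b'), while B keeps the
-- digit unchanged in the rotated output, which is what a chunk-rotation function is meant to do.
def D_permufiesta (palabra : String) (m : Int) (l : Int) : Prop :=
  0 < m ∧ palabra.toList.any (fun c => '0' ≤ c && c ≤ '9') = true
instance (palabra : String) (m : Int) (l : Int) : Decidable (D_permufiesta palabra m l) := by
  unfold D_permufiesta; infer_instance

def Spec_permufiesta (palabra : String) (m : Int) (l : Int) (out : String) : Prop :=
  ¬ D_permufiesta palabra m l → out = permufiesta_alt palabra m l
instance (palabra : String) (m : Int) (l : Int) (out : String) : Decidable (Spec_permufiesta palabra m l out) := by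
  unfold Spec_permufiesta; infer_instance

def pvDiffWitness_permufiesta : String × Int × Int := ("1", 1, 0)
def pvDiffWitnessOut_permufiesta : String × String := ("b", "1")

-- ===== CLAIM (what is proved, stated in full; the proofs are below) =====
def Claim_unchanged_permufiesta : Prop := ∀ (palabra : String) (m : Int) (l : Int),
  Dom_permufiesta palabra m l → Pre_permufiesta palabra m l →
  Spec_permufiesta palabra m l (permufiesta palabra m l)
def Claim_changed_permufiesta : Prop :=
  Dom_permufiesta (pvDiffWitness_permufiesta.1) (pvDiffWitness_permufiesta.2.1) (pvDiffWitness_permufiesta.2.2) ∧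
  Pre_permufiesta (pvDiffWitness_permufiesta.1) (pvDiffWitness_permufiesta.2.1) (pvDiffWitness_permufiesta.2.2) ∧
  D_permufiesta (pvDiffWitness_permufiesta.1) (pvDiffWitness_permufiesta.2.1) (pvDiffWitness_permufiesta.2.2) ∧
  permufiesta (pvDiffWitness_permufiesta.1) (pvDiffWitness_permufiesta.2.1) (pvDiffWitness_permufiesta.2.2) = pvDiffWitnessOut_permufiesta.1 ∧
  permufiesta_alt (pvDiffWitness_permufiesta.1) (pvDiffWitness_permufiesta.2.1) (pvDiffWitness_permufiesta.2.2) = pvDiffWitnessOut_permufiesta.2 ∧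
  pvDiffWitnessOut_permufiesta.1 ≠ pvDiffWitnessOut_permufiesta.2
def Claim_exact_permufiesta : Prop := ∀ (palabra : String) (m : Int) (l : Int),
  Dom_permufiesta palabra m l → Pre_permufiesta palabra m l → D_permufiesta palabra m l →
  permufiesta palabra m l ≠ permufiesta_alt palabra m l

-- ===== LEMMAS AND PROOFS =====

def charOK (c : Char) : Prop := ('a' ≤ c ∧ c ≤ 'z') ∨ ('0' ≤ c ∧ c ≤ '9')

-- what A's convert puts at the slot of character c
def fA (c : Char) : PyElem :=
  if 'a' ≤ c ∧ c ≤ 'z' then PyElem.num ((c.toNat : Int) - 97) else PyElem.ch c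

-- what A's deconvert then prints for character c
def mapChar (c : Char) : Char :=
  if 'a' ≤ c ∧ c ≤ 'z' then c else listaA.getD (c.toNat - 48) ' '

-- the concatenation of the rotated chunks (B's value; A prints its image under mapChar)
def finalLDef (cs : List Char) (m l : Int) : List Char :=
  (PySem.List.pyRange 0 (cs.length : Int) m).flatMap
    (fun x0 => rotOf l (PySem.List.slice cs (some x0) (some (x0 + m))))

theorem char_toNat_inj (c d : Char) (h : c.toNat = d.toNat) : c = d := by
  calc c = Char.ofNat c.toNat := (Char.ofNat_toNat c).symm
    _ = Char.ofNat d.toNat := by rw [h]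
    _ = d := Char.ofNat_toNat d

theorem charL_toNat {c : Char} (h : 'a' ≤ c ∧ c ≤ 'z') : 97 ≤ c.toNat ∧ c.toNat ≤ 122 := by
  obtain ⟨h1, h2⟩ := h
  rw [Char.le_def, UInt32.le_iff_toNat_le] at h1 h2
  exact ⟨h1, h2⟩

theorem charD_toNat {c : Char} (h : '0' ≤ c ∧ c ≤ '9') : 48 ≤ c.toNat ∧ c.toNat ≤ 57 := by
  obtain ⟨h1, h2⟩ := h
  rw [Char.le_def, UInt32.le_iff_toNat_le] at h1 h2
  exact ⟨h1, h2⟩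

theorem not_charL_of_le {c : Char} (h : c.toNat ≤ 57) : ¬ ('a' ≤ c ∧ c ≤ 'z') := by
  intro hc
  have := charL_toNat hc
  omega

theorem lista_toNat : ∀ j : Nat, j < 26 → (listaA.getD j ' ').toNat = 97 + j := by decide

theorem listaA_length : listaA.length = 26 := by decide

theorem len_listaA : PySem.List.len listaA = 26 := by decide

theorem pyGetD_lista (j : Int) (h0 : 0 ≤ j) (h26 : j < 26) :
    PySem.List.pyGetD listaA j ' ' = listaA.getD j.toNat ' ' := by
  rw [PySem.List.pyGetD_eq_getElem listaA ' ' h0 (by rw [listaA_length]; exact_mod_cast h26),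
    List.getD_eq_getElem listaA ' ' (by rw [listaA_length]; omega)]

theorem ofChars?_digit (c : Char) (h0 : 48 ≤ c.toNat) (h9 : c.toNat ≤ 57) :
    PySem.Int.ofChars? [c] = some ((c.toNat : Int) - 48) := by
  have hc := Char.ofNat_toNat c
  set n := c.toNat with hn
  clear_value n
  subst hc
  interval_cases n <;> decide

-- a scan segment with no matching letter leaves the list unchanged
theorem foldC_nomatch (c : Char) (count : Int) (js : List Int)
    (h : ∀ j ∈ js, PyElem.ch c ≠ PyElem.ch (PySem.List.pyGetD listaA j ' ')) :
    ∀ cur, js.foldl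
      (fun cur j => if PyElem.ch c = PyElem.ch (PySem.List.pyGetD listaA j ' ')
        then PySem.List.pySetD cur count (PyElem.num j) else cur) cur = cur := by
  induction js with
  | nil => intro cur; rfl
  | cons j js ih =>
    intro cur
    rw [List.foldl_cons, if_neg (h j (by simp))]
    exact ih (fun a ha => h a (by simp [ha])) cur

theorem innerC_letter (c : Char) (h1 : 97 ≤ c.toNat) (h2 : c.toNat ≤ 122) (count : Int) (cur : List PyElem) :
    innerC (PyElem.ch c) count cur = PySem.List.pySetD cur count (PyElem.num ((c.toNat : Int) - 97)) := by
  set k : Int := (c.toNat : Int) - 97 with hk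
  have hk0 : 0 ≤ k := by omega
  have hk26 : k < 26 := by omega
  have hget : ∀ j : Int, 0 ≤ j → j < 26 → j ≠ k →
      PyElem.ch c ≠ PyElem.ch (PySem.List.pyGetD listaA j ' ') := by
    intro j hj0 hj26 hjk heq
    have hcj : c = listaA.getD j.toNat ' ' := by
      have := PyElem.ch.inj heq
      rw [pyGetD_lista j hj0 hj26] at this
      exact this
    have := lista_toNat j.toNat (by omega)
    rw [← hcj] at this
    omega
  unfold innerC
  rw [len_listaA,
    PySem.List.pyRange_one_append 0 k 26 hk0 (by omega),
    PySem.List.pyRange_one_append k (k + 1) 26 (by omega) (by omega),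
    PySem.List.pyRange_one_singleton,
    List.foldl_append, List.foldl_append]
  rw [foldC_nomatch c count _ (fun j hj => by
    have hb := PySem.List.mem_pyRange_one.mp hj
    exact hget j hb.1 (by omega) (by omega)) cur]
  rw [List.foldl_cons, List.foldl_nil]
  rw [if_pos (by
    have : c = listaA.getD k.toNat ' ' := by
      apply char_toNat_inj
      rw [lista_toNat k.toNat (by omega)]
      omega
    rw [pyGetD_lista k hk0 hk26, ← this])]
  rw [foldC_nomatch c count _ (fun j hj => by
    have hb := PySem.List.mem_pyRange_one.mp hj
    exact hget j (by omega) hb.2 (by omega))]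

theorem innerC_digit (c : Char) (h : c.toNat ≤ 57) (count : Int) (cur : List PyElem) :
    innerC (PyElem.ch c) count cur = cur := by
  unfold innerC
  rw [len_listaA]
  apply foldC_nomatch
  intro j hj heq
  have hb := PySem.List.mem_pyRange_one.mp hj
  have hcj := PyElem.ch.inj heq
  rw [pyGetD_lista j hb.1 hb.2] at hcj
  have := lista_toNat j.toNat (by omega)
  rw [← hcj] at this
  omega

theorem convertA_go (cs : List Char) : ∀ (pre : List PyElem), (∀ c ∈ cs, charOK c) →
    ((cs.map PyElem.ch).foldl (fun (st : List PyElem × Int) i => (innerC i st.2 st.1, st.2 + 1))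
      (pre ++ cs.map PyElem.ch, (pre.length : Int))).1 = pre ++ cs.map fA := by
  induction cs with
  | nil => intro pre _; simp
  | cons c cs ih =>
    intro pre hok
    have hx : charOK c := hok c (by simp)
    rw [List.map_cons, List.foldl_cons]
    have hstep : (innerC (PyElem.ch c) (pre.length : Int) (pre ++ PyElem.ch c :: cs.map PyElem.ch),
        ((pre.length : Int) + 1)) =
        ((pre ++ [fA c]) ++ cs.map PyElem.ch, (((pre ++ [fA c]).length : Nat) : Int)) := by
      have hlen : ((pre.length : Int) + 1) = (((pre ++ [fA c]).length : Nat) : Int) := by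
        simp
      rcases hx with hL | hD
      · have hb := charL_toNat hL
        rw [innerC_letter c hb.1 hb.2, PySem.List.pySetD_natCast, List.set_append,
          if_neg (by omega)]
        simp only [Nat.sub_self, List.set_cons_zero]
        rw [hlen]
        have : fA c = PyElem.num ((c.toNat : Int) - 97) := if_pos hL
        rw [this]
        simp
      · have hb := charD_toNat hD
        rw [innerC_digit c (by omega)]
        rw [hlen]
        have : fA c = PyElem.ch c := if_neg (not_charL_of_le (by omega))
        rw [this]
        simp
    rw [hstep, ih (pre ++ [fA c]) (fun a ha => hok a (by simp [ha]))]
    simp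

theorem convertA_spec (cs : List Char) (hok : ∀ c ∈ cs, charOK c) :
    convertA (cs.map PyElem.ch) = cs.map fA := by
  have := convertA_go cs [] hok
  simpa [convertA] using this

theorem deconvertA_go (cs : List Char) : ∀ (s : List Char), (∀ c ∈ cs, charOK c) →
    (cs.map fA).foldl (fun (acc : Option (List Char)) e =>
      acc.bind (fun s =>
        ((match e with
          | .num n => some n
          | .ch c => PySem.Int.ofChars? [c])).bind (fun v =>
          (PySem.List.pyGet? listaA v).map (fun d => s ++ [d])))) (some s)
      = some (s ++ cs.map mapChar) := by
  induction cs with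
  | nil => intro s _; simp
  | cons c cs ih =>
    intro s hok
    have hx : charOK c := hok c (by simp)
    rw [List.map_cons, List.foldl_cons]
    have hstep : (some s).bind (fun s =>
        ((match fA c with
          | .num n => some n
          | .ch c => PySem.Int.ofChars? [c])).bind (fun v =>
          (PySem.List.pyGet? listaA v).map (fun d => s ++ [d]))) = some (s ++ [mapChar c]) := by
      rcases hx with hL | hD
      · have hb := charL_toNat hL
        have hfa : fA c = PyElem.num ((c.toNat : Int) - 97) := if_pos hL
        rw [hfa]
        simp only [Option.bind_some]
        rw [PySem.List.pyGet?_eq_some_getElem listaA (by omega)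
          (by rw [listaA_length]; push_cast; omega)]
        simp only [Option.map_some]
        have hc : listaA[((c.toNat : Int) - 97).toNat]'(by rw [listaA_length]; omega) = c := by
          apply char_toNat_inj
          rw [← List.getD_eq_getElem listaA ' ' (by rw [listaA_length]; omega)]
          rw [lista_toNat ((c.toNat : Int) - 97).toNat (by omega)]
          omega
        rw [hc]
        have : mapChar c = c := if_pos hL
        rw [this]
      · have hb := charD_toNat hD
        have hfa : fA c = PyElem.ch c := if_neg (not_charL_of_le (by omega))
        rw [hfa]
        simp only [Option.bind_some]
        rw [ofChars?_digit c hb.1 hb.2]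
        simp only [Option.bind_some]
        rw [PySem.List.pyGet?_eq_some_getElem listaA (by omega)
          (by rw [listaA_length]; push_cast; omega)]
        simp only [Option.map_some]
        have : listaA[((c.toNat : Int) - 48).toNat]'(by rw [listaA_length]; omega) = mapChar c := by
          apply char_toNat_inj
          rw [← List.getD_eq_getElem listaA ' ' (by rw [listaA_length]; omega)]
          rw [lista_toNat ((c.toNat : Int) - 48).toNat (by omega)]
          unfold mapChar
          rw [if_neg (not_charL_of_le (by omega)), lista_toNat (c.toNat - 48) (by omega)]
          omega
        rw [this]
    rw [hstep, ih (s ++ [mapChar c]) (fun a ha => hok a (by simp [ha]))]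
    simp

theorem deconvertA_spec (cs : List Char) (hok : ∀ c ∈ cs, charOK c) :
    deconvertA (cs.map fA) = some (cs.map mapChar) := by
  have := deconvertA_go cs [] hok
  simpa [deconvertA] using this

-- the first per-chunk loop collects x[l:]
theorem loop1_eq (x : List Char) (l : Int) (hl : 0 ≤ l) (t0 : List Char) :
    (PySem.List.pyRange l (PySem.List.len x) 1).foldl (fun t i => t ++ [PySem.List.pyGetD x i ' ']) t0
      = t0 ++ x.drop l.toNat := by
  rw [PySem.List.foldl_append_singleton_eq_map]
  congr 1
  rw [PySem.List.len_eq, PySem.List.pyRange_one, List.map_map]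
  apply List.ext_getElem
  · simp only [List.length_map, List.length_range, List.length_drop]
    omega
  · intro k h1 h2
    simp only [List.getElem_map, List.getElem_range, Function.comp_apply]
    have hlen : l + (k : Int) < (x.length : Int) := by
      simp only [List.length_map, List.length_range] at h1
      omega
    rw [PySem.List.pyGetD_eq_getElem x ' ' (by omega) hlen, List.getElem_drop]
    congr 1
    omega

-- the break loop collects x[:min(l, len x)]
theorem loopA2_eq (x : List Char) (l : Int) (hl : 0 ≤ l) :
    ∀ (fuel i : Nat) (acc : List Char), i < x.length → x.length - i ≤ fuel →
    loopA2 fuel x l (i : Int) acc = acc ++ (x.drop i).take (min l.toNat x.length - i) := by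
  intro fuel
  induction fuel with
  | zero => intro i acc h1 h2; omega
  | succ fuel ih =>
    intro i acc h1 h2
    show (if (i : Int) < l then
        let acc2 := acc ++ [PySem.List.pyGetD x (i : Int) ' ']
        if (i : Int) ≥ PySem.List.len x - 1 then acc2 else loopA2 fuel x l ((i : Int) + 1) acc2
      else acc) = _
    by_cases hil : (i : Int) < l
    · rw [if_pos hil]
      simp only [PySem.List.len_eq]
      rw [PySem.List.pyGetD_eq_getElem x ' ' (by omega) (by omega)]
      simp only [Int.toNat_natCast]
      by_cases hend : (i : Int) ≥ (x.length : Int) - 1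
      · rw [if_pos hend]
        have hieq : i = x.length - 1 := by omega
        have hmin : min l.toNat x.length - i = 1 := by omega
        rw [hmin, List.drop_eq_getElem_cons h1, List.take_succ_cons, List.take_zero]
      · rw [if_neg hend]
        have h1' : i + 1 < x.length := by omega
        have := ih (i + 1) (acc ++ [x[i]]) h1' (by omega)
        push_cast at this
        rw [this, List.append_assoc]
        congr 1
        have hmin : min l.toNat x.length - i = (min l.toNat x.length - (i + 1)) + 1 := by omega
        rw [hmin, List.drop_eq_getElem_cons h1, List.take_succ_cons]
        rfl
    · rw [if_neg hil]
      have : min l.toNat x.length - i = 0 := by omega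
      rw [this, List.take_zero, List.append_nil]

theorem testOf_eq_rotOf (x : List Char) (hne : x ≠ []) (l : Int) (hl : 0 ≤ l) :
    testOf l x = rotOf l x := by
  have hxpos : 0 < x.length := List.length_pos_iff.mpr hne
  unfold testOf
  rw [loop1_eq x l hl []]
  have h0 := loopA2_eq x l hl x.length 0 ([] ++ x.drop l.toNat) hxpos (by omega)
  simp only [Nat.cast_zero] at h0
  rw [h0]
  simp only [List.nil_append, List.drop_zero, Nat.sub_zero]
  unfold rotOf
  rw [PySem.List.slice_from x hl, PySem.List.slice_to x hl]
  congr 1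
  by_cases h : l.toNat ≤ x.length
  · rw [min_eq_left h]
  · rw [min_eq_right (by omega), List.take_length, List.take_of_length_le (by omega)]

-- range(0, b, m) with m < 0 and 0 ≤ b is empty
theorem pyRange_neg_nil (b m : Int) (hm : m < 0) (hb : 0 ≤ b) :
    PySem.List.pyRange 0 b m = [] := by
  simp only [PySem.List.pyRange]
  rw [if_neg (by omega), if_neg (by omega), if_neg (by omega)]
  simp

-- everything in finalLDef comes from the word
theorem finalL_subset (cs : List Char) (m l : Int) (c : Char) (hc : c ∈ finalLDef cs m l) :
    c ∈ cs := by
  unfold finalLDef at hc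
  obtain ⟨x0, _, hcrot⟩ := List.mem_flatMap.mp hc
  unfold rotOf at hcrot
  rcases List.mem_append.mp hcrot with h | h <;>
    exact PySem.List.mem_of_mem_slice _ _ _ (PySem.List.mem_of_mem_slice _ _ _ h)

-- for m > 0 every character of the word survives into finalLDef
theorem mem_finalL (cs : List Char) (m l : Int) (hpos : 0 < m) (hl : 0 ≤ l)
    (d : Char) (hd : d ∈ cs) : d ∈ finalLDef cs m l := by
  obtain ⟨i, hi, hie⟩ := List.getElem_of_mem hd
  set mt := m.toNat with hmt
  have hmt0 : 0 < mt := by omega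
  have hmeq : (mt : Int) = m := Int.toNat_of_nonneg (by omega)
  have hdm := Nat.div_add_mod i mt
  have hmod := Nat.mod_lt i hmt0
  set q := i / mt with hq
  set rm := i % mt with hrm
  have hle : q * mt ≤ i := Nat.div_mul_le_self i mt
  have hcomm : q * mt = mt * q := Nat.mul_comm q mt
  set x0 : Int := ((q * mt : Nat) : Int) with hx0
  have hx0mem : x0 ∈ PySem.List.pyRange 0 (cs.length : Int) m := by
    rw [PySem.List.mem_pyRange_iff_of_pos hpos]
    refine ⟨by positivity, by rw [hx0]; exact_mod_cast Nat.lt_of_le_of_lt hle hi, ?_⟩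
    rw [sub_zero]
    exact ⟨(q : Int), by rw [hx0, ← hmeq]; push_cast; ring⟩
  unfold finalLDef
  refine List.mem_flatMap.mpr ⟨x0, hx0mem, ?_⟩
  set s := PySem.List.slice cs (some x0) (some (x0 + m)) with hs
  have hds : d ∈ s := by
    rw [hs, PySem.List.slice_toNat cs (by positivity) (by omega)]
    set r := i - q * mt with hr
    have hrlt : r < mt := by omega
    have hxmt : (x0 + m).toNat - x0.toNat = mt := by omega
    have hx0t : x0.toNat = q * mt := by omega
    rw [hxmt, hx0t]
    have hlen : r < ((cs.drop (q * mt)).take mt).length := by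
      simp only [List.length_take, List.length_drop]
      omega
    have hval : ((cs.drop (q * mt)).take mt)[r]'hlen = d := by
      rw [List.getElem_take, List.getElem_drop]
      rw [← hie]
      simp only [show q * mt + r = i from by omega]
    exact hval ▸ List.getElem_mem hlen
  unfold rotOf
  rw [PySem.List.slice_from s hl, PySem.List.slice_to s hl]
  have hsp : d ∈ s.take l.toNat ++ s.drop l.toNat := by
    rw [List.take_append_drop]; exact hds
  rcases List.mem_append.mp hsp with h | h
  · exact List.mem_append.mpr (Or.inr h)
  · exact List.mem_append.mpr (Or.inl h)

-- A's value, for m > 0, 0 ≤ l, word over [a-z0-9]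
theorem eval_A (palabra : String) (m l : Int) (hpos : 0 < m) (hl : 0 ≤ l)
    (hchar : palabra.toList.all (fun c => ('a' ≤ c && c ≤ 'z') || ('0' ≤ c && c ≤ '9')) = true) :
    permufiesta palabra m l = String.ofList ((finalLDef palabra.toList m l).map mapChar) := by
  have hall : ∀ c ∈ palabra.toList, charOK c := by
    intro c hc
    have := List.all_eq_true.mp hchar c hc
    simpa [charOK, Bool.or_eq_true, Bool.and_eq_true, decide_eq_true_eq] using this
  unfold permufiesta
  simp only [PySem.List.len_eq]
  set cs := palabra.toList with hcs
  set starts := PySem.List.pyRange 0 (cs.length : Int) m with hstarts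
  have hchunk_ne : ∀ x0 ∈ starts, PySem.List.slice cs (some x0) (some (x0 + m)) ≠ [] := by
    intro x0 hx0
    have hb := (PySem.List.mem_pyRange_iff_of_pos hpos x0).mp hx0
    rw [PySem.List.slice_toNat cs hb.1 (by omega)]
    intro hnil
    have := congrArg List.length hnil
    simp only [List.length_take, List.length_drop, List.length_nil] at this
    omega
  rw [PySem.List.foldl_append_eq_flatMap (g := testOf l), List.nil_append]
  have hflat : (starts.map (fun x => PySem.List.slice cs (some x) (some (x + m)))).flatMap (testOf l)
      = finalLDef cs m l := by
    unfold finalLDef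
    rw [List.flatMap_map]
    apply List.flatMap_congr
    intro x0 hx0
    exact testOf_eq_rotOf _ (hchunk_ne x0 hx0) l hl
  rw [hflat]
  have hokF : ∀ c ∈ finalLDef cs m l, charOK c := fun c hc => hall c (finalL_subset cs m l c hc)
  rw [convertA_spec _ hokF, deconvertA_spec _ hokF]

-- B's value
theorem eval_B (palabra : String) (m l : Int) :
    permufiesta_alt palabra m l = String.ofList (finalLDef palabra.toList m l) := by
  unfold permufiesta_alt finalLDef
  simp only [PySem.List.len_eq]
  rw [PySem.List.foldl_append_eq_flatMap
    (g := fun x0 => rotOf l (PySem.List.slice palabra.toList (some x0) (some (x0 + m)))),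
    List.nil_append]

-- a digit is not fixed by mapChar
theorem mapChar_digit_ne (d : Char) (h0 : 48 ≤ d.toNat) (h9 : d.toNat ≤ 57) :
    mapChar d ≠ d := by
  intro h
  have : (mapChar d).toNat = 97 + (d.toNat - 48) := by
    unfold mapChar
    rw [if_neg (not_charL_of_le (by omega)), lista_toNat (d.toNat - 48) (by omega)]
  rw [h] at this
  omega

-- ===== VERDICT (by name: the statement is the Claim_ definition above) =====
theorem permufiesta_spec : Claim_unchanged_permufiesta := by
  intro palabra m l _hdom hpre
  unfold Spec_permufiesta
  intro hnd
  obtain ⟨hm, hrest⟩ := hpre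
  rcases lt_or_gt_of_ne hm with hneg | hpos
  · -- m < 0: the chunk list is empty on both sides
    unfold permufiesta permufiesta_alt
    simp only [PySem.List.len_eq]
    rw [pyRange_neg_nil (palabra.toList.length : Int) m hneg (by positivity)]
    simp [convertA, deconvertA]
  · rcases hrest with h | ⟨hl, hchar⟩
    · omega
    rw [eval_A palabra m l hpos hl hchar, eval_B]
    congr 1
    refine (List.map_congr_left ?_).trans (List.map_id _)
    intro c hc
    have hcs := finalL_subset _ _ _ c hc
    have hok := List.all_eq_true.mp hchar c hcs
    have hnod : ¬ (('0' ≤ c && c ≤ '9') = true) := by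
      intro hdd
      exact hnd ⟨hpos, List.any_eq_true.mpr ⟨c, hcs, hdd⟩⟩
    simp only [Bool.or_eq_true, Bool.and_eq_true, decide_eq_true_eq] at hok hnod
    have hL : 'a' ≤ c ∧ c ≤ 'z' := by tauto
    show mapChar c = c
    unfold mapChar
    rw [if_pos hL]

theorem permufiesta_changed : Claim_changed_permufiesta := by
  unfold Claim_changed_permufiesta; decide

theorem permufiesta_tight : Claim_exact_permufiesta := by
  intro palabra m l _hdom hpre hd
  obtain ⟨hpos, hdig⟩ := hd
  obtain ⟨hm, hrest⟩ := hpre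
  rcases hrest with h | ⟨hl, hchar⟩
  · omega
  obtain ⟨d, hdcs, hdd⟩ := List.any_eq_true.mp hdig
  simp only [Bool.and_eq_true, decide_eq_true_eq] at hdd
  have hb := charD_toNat hdd
  rw [eval_A palabra m l hpos hl hchar, eval_B]
  intro heq
  have h2 := congrArg String.toList heq
  simp only [String.toList_ofList] at h2
  have hdF : d ∈ finalLDef palabra.toList m l := mem_finalL _ _ _ hpos hl d hdcs
  obtain ⟨i, hi, hie⟩ := List.getElem_of_mem hdF
  have h4 := List.getElem_of_eq h2 (by simpa using hi)
  rw [List.getElem_map] at h4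
  have h5 : mapChar d = d := by rw [← hie]; exact h4
  exact mapChar_digit_ne d hb.1 hb.2 h5
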